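-- pv_equiv track=rewrite | github.com/pommevilla/bcb.567 | multisequence_alignment/bcb567_project3_utils.py | create_superword_array
-- ===== SOURCE A (Python) =====
-- def create_superword_array(word_code_array, wlength, wlcut):
--     """
--     inputs:
--         word_code_array - an array of word codes returned by create_word_code_array
--         wlength - the number of characters in each word
--         wlcut - the number of words in each superword
--
--     Create a sorted array of superwords from word_code_array.
--
--     >>> create_superword_array([4, 3, 13, 6, 11, 14, 8, -1, -1, 3, 13, 6, 11, 14, 11, -1, -1], 2, 3)
--     [8, 9, 16, 17, 2, 10, 1, 4, 12, 7, 15, 5, 13, 3, 11, 6, 14]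
--     """
--     n = len(word_code_array)
--
--     score_bucket = [[] for _ in range(4 ** wlength + 1)]
--     sorted_superwords = [i for i in range(n)]
--
--     for word_level in range(wlcut):
--         for i in range(n):
--             pos = sorted_superwords[i] - wlength
--             if pos >= 0:
--                 code = word_code_array[pos]
--                 score_bucket[code].append(pos)
--
--         for pos in range(n - wlength, n):
--             code = word_code_array[pos]
--             score_bucket[code].append(pos)
--
--         sorted_superwords = [i for i in score_bucket[-1]]
--
--         for bucket in score_bucket[:-1]:
--             for pos in bucket:
--                 sorted_superwords.append(pos)
--
--         score_bucket = [[] for _ in range(4 ** wlength + 1)]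
--
--     return [i + 1 for i in sorted_superwords]
-- ===== SOURCE B (Python) =====
-- def create_superword_array(word_code_array, wlength, wlcut):
--     """Sort positions by their superword keys with one comparison sort instead of
--     the multi-pass bucket/radix sort."""
--     n = len(word_code_array)
--     big = 4 ** wlength  # sorts after every real word code; -1 sorts first naturally
--
--     def key(p):
--         return [word_code_array[p + k * wlength] if p + k * wlength < n else big
--                 for k in range(wlcut)] + [p]
--
--     return [p + 1 for p in sorted(range(n), key=key)]
-- ===== Notes on version B (the rewrite author's own statement) =====
-- stated objective: alternative
-- what changed: Replaces the wlcut-pass bucket/radix sort (which allocates 4^wlength+1 buckets per pass and re-scatters positions by word code) with a single comparison sort: sorted(range(n)) under an explicit per-position superword key (the wlcut word codes, a past-the-end sentinel 4**wlength, and the position as tiebreaker).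
-- outside the precondition, e.g. on create_superword_array([0], 2, 1): A returns [0, 1], B returns [1]; on create_superword_array([-2, 0], 1, 1): A returns [2, 1], B returns [1, 2]
import Mathlib
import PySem

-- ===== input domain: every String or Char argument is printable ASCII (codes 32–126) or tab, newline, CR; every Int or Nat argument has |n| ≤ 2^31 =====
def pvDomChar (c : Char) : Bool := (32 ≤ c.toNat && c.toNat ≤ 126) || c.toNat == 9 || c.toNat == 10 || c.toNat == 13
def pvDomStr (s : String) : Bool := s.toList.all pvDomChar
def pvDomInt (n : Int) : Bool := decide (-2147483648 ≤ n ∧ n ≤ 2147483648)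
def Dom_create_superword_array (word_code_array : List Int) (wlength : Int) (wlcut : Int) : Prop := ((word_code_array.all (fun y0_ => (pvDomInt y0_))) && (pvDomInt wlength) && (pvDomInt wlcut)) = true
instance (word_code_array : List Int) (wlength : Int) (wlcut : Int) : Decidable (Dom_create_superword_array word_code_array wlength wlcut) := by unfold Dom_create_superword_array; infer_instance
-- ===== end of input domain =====

-- B replaces A's multi-pass bucket/radix sort by a single comparison sort of the
-- positions under an explicit superword key (same values; alternative algorithm).


-- ===== PORT A =====
-- Python 'score_bucket[code].append(pos)': list update at a possibly negative index
-- (Python counts from the end); exact wherever Python does not raise IndexError.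
def pvBucketApp (sb : List (List Int)) (code : Int) (pos : Int) : List (List Int) :=
  let j : Int := if code < 0 then code + (sb.length : Int) else code
  sb.set j.toNat (sb.getD j.toNat [] ++ [pos])

-- one iteration of A's outer loop 'for word_level in range(wlcut)'
-- ('4 ** wlength' is 4 ^ wlength.toNat: for wlength < 0 Python raises TypeError at
-- 'range(4 ** wlength + 1)', so that case carries no claim)
def pvPassA (wca : List Int) (wlength : Int) (ssw : List Int) : List Int :=
  let n : Int := wca.length
  let sb0 : List (List Int) := List.replicate (4 ^ wlength.toNat + 1) []
  let sb1 := (PySem.List.pyRange 0 n 1).foldl (fun sb i =>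
      let pos := PySem.List.pyGetD ssw i 0 - wlength
      if 0 ≤ pos then pvBucketApp sb (PySem.List.pyGetD wca pos 0) pos else sb) sb0
  let sb2 := (PySem.List.pyRange (n - wlength) n 1).foldl (fun sb pos =>
      pvBucketApp sb (PySem.List.pyGetD wca pos 0) pos) sb1
  sb2.getLastD [] ++ sb2.dropLast.flatten

def create_superword_array (word_code_array : List Int) (wlength : Int) (wlcut : Int) : List Int :=
  let n : Int := word_code_array.length
  ((PySem.List.pyRange 0 wlcut 1).foldl
      (fun ssw _ => pvPassA word_code_array wlength ssw)
      (PySem.List.pyRange 0 n 1)).map (· + 1)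

-- ===== PORT B =====
-- Source B's key(p): the wlcut word codes of the superword at p (a missing word is
-- 'big' = 4 ** wlength so that it sorts after every code), then p as tiebreaker
def pvKeyB (wca : List Int) (wlength : Int) (wlcut : Int) (p : Int) : List Int :=
  ((PySem.List.pyRange 0 wlcut 1).map (fun k =>
      if p + k * wlength < (wca.length : Int) then PySem.List.pyGetD wca (p + k * wlength) 0
      else 4 ^ wlength.toNat)) ++ [p]

def create_superword_array_alt (word_code_array : List Int) (wlength : Int) (wlcut : Int) : List Int :=
  (PySem.List.sorted (PySem.List.pyRange 0 (word_code_array.length : Int) 1)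
      (pvKeyB word_code_array wlength wlcut) false).map (· + 1)

-- ===== PRECONDITION & SPEC =====
-- Pre_ is the function's natural domain: either no pass runs at all (wlcut ≤ 0, any
-- codes), or the word codes are as produced by the module's create_word_code_array
-- (each in [-1, 4^wlength)) with 0 ≤ wlength ≤ len.  Outside it A either raises
-- (IndexError/TypeError: wlength < 0, a code outside [-(4^wlength+1), 4^wlength],
-- wlength > 2*len) or returns a value produced by Python negative-index wraparound
-- into score_bucket / word_code_array (a code in [-(4^wlength+1), -2], a code equal
-- to 4^wlength, or len < wlength ≤ 2*len).
-- (the 'min' with the length only keeps the Decidable instance cheap to evaluate on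
-- junk wlength; together with wlength ≤ len the bound IS 4 ^ wlength)
def Pre_create_superword_array (word_code_array : List Int) (wlength : Int) (wlcut : Int) : Prop :=
  0 ≤ wlength ∧ (wlcut ≤ 0 ∨
    (wlength ≤ (word_code_array.length : Int) ∧
      ∀ c ∈ word_code_array, -1 ≤ c ∧ c < (4 : Int) ^ (min wlength.toNat word_code_array.length)))
instance (word_code_array : List Int) (wlength : Int) (wlcut : Int) : Decidable (Pre_create_superword_array word_code_array wlength wlcut) := by unfold Pre_create_superword_array; infer_instance

def pvWitness_create_superword_array : List Int × Int × Int :=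
  ([4, 3, 13, 6, 11, 14, 8, -1, -1, 3, 13, 6, 11, 14, 11, -1, -1], 2, 3)

def Spec_create_superword_array (word_code_array : List Int) (wlength : Int) (wlcut : Int) (out : List Int) : Prop := out = create_superword_array_alt word_code_array wlength wlcut
instance (word_code_array : List Int) (wlength : Int) (wlcut : Int) (out : List Int) : Decidable (Spec_create_superword_array word_code_array wlength wlcut out) := by unfold Spec_create_superword_array; infer_instance

-- ===== CLAIM (what is proved, stated in full; the proofs are below) =====
def Claim_equal_create_superword_array : Prop := ∀ (word_code_array : List Int) (wlength : Int) (wlcut : Int), Dom_create_superword_array word_code_array wlength wlcut → Pre_create_superword_array word_code_array wlength wlcut → Spec_create_superword_array word_code_array wlength wlcut (create_superword_array word_code_array wlength wlcut)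

-- ===== LEMMAS AND PROOFS =====

-- proof-layer vocabulary -----------------------------------------------------
-- the word code at position pos
def pvCode (wca : List Int) (pos : Int) : Int := PySem.List.pyGetD wca pos 0
-- k-th word entry of the superword key at p ('big' = 4^wlength past the end)
def pvE (wca : List Int) (w : Int) (p : Int) (k : Nat) : Int :=
  if p + (k : Int) * w < (wca.length : Int) then PySem.List.pyGetD wca (p + (k : Int) * w) 0
  else (4 : Int) ^ w.toNat
-- first t word entries
def pvEnt (wca : List Int) (w : Int) (t : Nat) (p : Int) : List Int :=
  (List.range t).map (pvE wca w p)
-- the full t-word key with position tiebreaker, as a list (B's key at t = wlcut)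
def pvKt (wca : List Int) (w : Int) (t : Nat) (p : Int) : List Int := pvEnt wca w t p ++ [p]
-- strict order on positions: t-word entries lexicographically, ties by position
def pvLtK (wca : List Int) (w : Int) (t : Nat) (p q : Int) : Prop :=
  pvEnt wca w t p < pvEnt wca w t q ∨ (pvEnt wca w t p = pvEnt wca w t q ∧ p < q)
-- the Python bucket index for code c (negative counts from the end)
def pvBidx (nb : Nat) (c : Int) : Nat := (if c < 0 then c + (nb : Int) else c).toNat
-- the stream of positions one pass of A feeds into the buckets
def pvS (wca : List Int) (w : Int) (ssw : List Int) : List Int :=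
  (ssw.filter (fun p => decide (0 ≤ p - w))).map (· - w) ++
    PySem.List.pyRange ((wca.length : Int) - w) (wca.length : Int) 1
-- what one pass emits: the -1 bucket first, then buckets 0 .. m-1
def pvEmit (wca : List Int) (m : Nat) (S : List Int) : List Int :=
  S.filter (fun pos => pvCode wca pos == -1) ++
    ((List.range m).map (fun b : Nat => S.filter (fun pos => pvCode wca pos == (b : Int)))).flatten

-- lexicographic glue ---------------------------------------------------------
theorem pv_lex_append (E : List Int) : ∀ (F : List Int), E.length = F.length →
    ∀ (x y : Int), (E < F ∨ (E = F ∧ x < y)) → E ++ [x] < F ++ [y] := by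
  induction E with
  | nil =>
    intro F hF x y h
    cases F with
    | nil =>
      rcases h with h | ⟨-, h⟩
      · exact absurd h (by intro h; cases h)
      · exact List.Lex.rel h
    | cons b F => simp at hF
  | cons a E ih =>
    intro F hF x y h
    cases F with
    | nil => simp at hF
    | cons b F =>
      rcases h with h | ⟨he, hxy⟩
      · cases h with
        | rel h => exact List.Lex.rel h
        | cons h => exact List.Lex.cons (ih F (by simpa using hF) x y (Or.inl h))
      · obtain ⟨rfl, rfl⟩ : a = b ∧ E = F := by simpa using he
        exact List.Lex.cons (ih E rfl x y (Or.inr ⟨rfl, hxy⟩))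

theorem pv_kt_lt (wca : List Int) (w : Int) (t : Nat) (p q : Int)
    (h : pvLtK wca w t p q) : pvKt wca w t p < pvKt wca w t q :=
  pv_lex_append _ _ (by simp [pvEnt]) p q h

-- key-entry arithmetic -------------------------------------------------------
theorem pvE_succ (wca : List Int) (w p : Int) (k : Nat) :
    pvE wca w p (k + 1) = pvE wca w (p + w) k := by
  have h : p + ((k : Int) + 1) * w = p + w + (k : Int) * w := by ring
  simp only [pvE, Nat.cast_add, Nat.cast_one, h]

theorem pvEnt_succ (wca : List Int) (w : Int) (t : Nat) (p : Int) :
    pvEnt wca w (t + 1) p = pvE wca w p 0 :: pvEnt wca w t (p + w) := by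
  simp only [pvEnt, List.range_succ_eq_map, List.map_cons, List.map_map]
  refine congrArg _ (List.map_congr_left fun k _ => ?_)
  simpa using pvE_succ wca w p k

theorem pvE_zero (wca : List Int) (w p : Int) (h : p < (wca.length : Int)) :
    pvE wca w p 0 = pvCode wca p := by
  simp [pvE, pvCode, h]

theorem pvE_big (wca : List Int) (w p : Int) (hw : 0 ≤ w) (hp : (wca.length : Int) ≤ p)
    (k : Nat) : pvE wca w p k = (4 : Int) ^ w.toNat := by
  have : ¬ p + (k : Int) * w < (wca.length : Int) := by
    have : 0 ≤ (k : Int) * w := mul_nonneg (by positivity) hw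
    omega
  simp [pvE, this]

theorem pvEnt_eq_of_ge (wca : List Int) (w : Int) (hw : 0 ≤ w) (t : Nat) (p q : Int)
    (hp : (wca.length : Int) ≤ p) (hq : (wca.length : Int) ≤ q) :
    pvEnt wca w t p = pvEnt wca w t q := by
  simp only [pvEnt]
  exact List.map_congr_left fun k _ => by
    rw [pvE_big wca w p hw hp k, pvE_big wca w q hw hq k]

theorem pv_code_mem (wca : List Int) (w : Int)
    (hc : ∀ c ∈ wca, -1 ≤ c ∧ c < (4 : Int) ^ w.toNat) (pos : Int)
    (h0 : 0 ≤ pos) (h1 : pos < (wca.length : Int)) :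
    -1 ≤ pvCode wca pos ∧ pvCode wca pos < (4 : Int) ^ w.toNat := by
  refine hc _ (PySem.List.pyGetD_mem wca 0 ?_)
  constructor <;> omega

-- building the order relation ------------------------------------------------
theorem pv_ltk_of_code_lt (wca : List Int) (w : Int) (t : Nat) (p q : Int)
    (hp : p < (wca.length : Int)) (hq : q < (wca.length : Int))
    (h : pvCode wca p < pvCode wca q) : pvLtK wca w (t + 1) p q := by
  left
  rw [pvEnt_succ, pvEnt_succ, pvE_zero wca w p hp, pvE_zero wca w q hq]
  exact List.Lex.rel h

theorem pv_ltk_succ_of_code_eq (wca : List Int) (w : Int) (t : Nat) (p q : Int)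
    (hp : p < (wca.length : Int)) (hq : q < (wca.length : Int))
    (he : pvCode wca p = pvCode wca q)
    (h : pvLtK wca w t (p + w) (q + w)) : pvLtK wca w (t + 1) p q := by
  rcases h with h | ⟨he', hlt⟩
  · left
    rw [pvEnt_succ, pvEnt_succ, pvE_zero wca w p hp, pvE_zero wca w q hq, he]
    exact List.Lex.cons h
  · right
    refine ⟨?_, by omega⟩
    rw [pvEnt_succ, pvEnt_succ, pvE_zero wca w p hp, pvE_zero wca w q hq, he, he']

theorem pv_ltk_of_lt_of_ge (wca : List Int) (w : Int)
    (hw : 0 ≤ w) (hc : ∀ c ∈ wca, -1 ≤ c ∧ c < (4 : Int) ^ w.toNat) (t : Nat) (p q : Int)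
    (hp0 : 0 ≤ p) (hpn : p < (wca.length : Int)) (hq : (wca.length : Int) ≤ q) :
    pvLtK wca w t p q := by
  cases t with
  | zero => exact Or.inr ⟨rfl, by omega⟩
  | succ t =>
    left
    rw [pvEnt_succ, pvEnt_succ, pvE_zero wca w p hpn, pvE_big wca w q hw hq 0]
    exact List.Lex.rel (pv_code_mem wca w hc p hp0 hpn).2

-- the bucket fold ------------------------------------------------------------
theorem pv_getD_set (l : List (List Int)) (j b : Nat) (v : List Int) (hj : j < l.length) :
    (l.set j v).getD b [] = if j = b then v else l.getD b [] := by
  simp only [List.getD_eq_getElem?_getD, List.getElem?_set, hj, if_true]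
  split_ifs <;> simp

theorem pv_bidx_last (nb : Nat) (hnb : 2 ≤ nb) (c : Int) (h1 : -1 ≤ c)
    (h2 : c < (nb : Int) - 1) : pvBidx nb c = nb - 1 ↔ c = -1 := by
  unfold pvBidx; split_ifs with h <;> omega

theorem pv_bidx_small (nb : Nat) (c : Int) (h1 : -1 ≤ c) (b : Nat) (hb : b < nb - 1) :
    pvBidx nb c = b ↔ c = (b : Int) := by
  unfold pvBidx; split_ifs with h <;> omega

theorem pv_bucket_fold (wca : List Int) (nb : Nat) (hnb : 2 ≤ nb) :
    ∀ (S : List Int) (sb : List (List Int)), sb.length = nb →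
      (∀ pos ∈ S, -1 ≤ pvCode wca pos ∧ pvCode wca pos < (nb : Int) - 1) →
      ((S.foldl (fun sb pos => pvBucketApp sb (pvCode wca pos) pos) sb).length = nb ∧
        ∀ b : Nat, b < nb →
          (S.foldl (fun sb pos => pvBucketApp sb (pvCode wca pos) pos) sb).getD b []
            = sb.getD b [] ++ S.filter (fun pos => pvBidx nb (pvCode wca pos) == b)) := by
  intro S
  induction S with
  | nil => intro sb hlen _; exact ⟨hlen, fun b _ => by simp⟩
  | cons pos S ih =>
    intro sb hlen hv
    have hcode := hv pos (by simp)
    have hjlt : pvBidx nb (pvCode wca pos) < nb := by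
      unfold pvBidx; split_ifs <;> omega
    have happ : pvBucketApp sb (pvCode wca pos) pos
        = sb.set (pvBidx nb (pvCode wca pos))
            (sb.getD (pvBidx nb (pvCode wca pos)) [] ++ [pos]) := by
      simp only [pvBucketApp, pvBidx, hlen]
    have hlen1 : (pvBucketApp sb (pvCode wca pos) pos).length = nb := by
      rw [happ, List.length_set, hlen]
    obtain ⟨hl, hb⟩ := ih (pvBucketApp sb (pvCode wca pos) pos) hlen1
      (fun x hx => hv x (by simp [hx]))
    refine ⟨hl, fun b hbnb => ?_⟩
    rw [List.foldl_cons, hb b hbnb, happ,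
      pv_getD_set sb _ b _ (by omega)]
    by_cases hcb : pvBidx nb (pvCode wca pos) = b
    · simp [hcb, List.filter_cons]
    · simp [hcb, List.filter_cons]

-- shape of the bucket list after one pass -----------------------------------
theorem pv_getLastD_eq (l : List (List Int)) :
    l.getLastD [] = l.getD (l.length - 1) [] := by
  rw [List.getLastD_eq_getLast?, List.getLast?_eq_getElem?, List.getD_eq_getElem?_getD]

theorem pv_dropLast_eq_map_range (l : List (List Int)) :
    l.dropLast = (List.range (l.length - 1)).map (fun b => l.getD b []) := by
  apply List.ext_getElem
  · simp [List.length_dropLast]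
  · intro i h1 h2
    have hi : i < l.length - 1 := by simpa using h1
    simp [List.getElem_dropLast, List.getD_eq_getElem?_getD,
      List.getElem?_eq_getElem (by omega : i < l.length)]

-- loop-shape helper: 'if pos >= 0: bucket it' over a list is a fold over the
-- filtered, shifted list
theorem pv_foldl_guard {β : Type} (w : Int) (g : β → Int → β) :
    ∀ (l : List Int) (init : β),
      l.foldl (fun acc p => if 0 ≤ p - w then g acc (p - w) else acc) init
        = ((l.filter (fun p => decide (0 ≤ p - w))).map (· - w)).foldl g init := by
  intro l
  induction l with
  | nil => intro init; rfl
  | cons p l ih =>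
    intro init
    by_cases h : 0 ≤ p - w
    · rw [List.foldl_cons, if_pos h, List.filter_cons, if_pos (decide_eq_true h),
        List.map_cons, List.foldl_cons, ih]
    · rw [List.foldl_cons, if_neg h, List.filter_cons, if_neg (by simpa using h), ih]

-- one pass of A equals pvEmit of the stream pvS ------------------------------
theorem pv_pass_eq_emit (wca : List Int) (w : Int) (ssw : List Int)
    (hlen : ssw.length = wca.length)
    (hc : ∀ c ∈ wca, -1 ≤ c ∧ c < (4 : Int) ^ w.toNat)
    (hmem : ∀ x ∈ pvS wca w ssw, 0 ≤ x ∧ x < (wca.length : Int)) :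
    pvPassA wca w ssw = pvEmit wca (4 ^ w.toNat) (pvS wca w ssw) := by
  have hnb : 2 ≤ 4 ^ w.toNat + 1 := by
    have : 1 ≤ 4 ^ w.toNat := Nat.one_le_pow _ _ (by norm_num)
    omega
  have hv : ∀ pos ∈ pvS wca w ssw,
      -1 ≤ pvCode wca pos ∧ pvCode wca pos < ((4 ^ w.toNat + 1 : Nat) : Int) - 1 := by
    intro pos hpos
    have h := pv_code_mem wca w hc pos (hmem pos hpos).1 (hmem pos hpos).2
    have hcast : ((4 ^ w.toNat + 1 : Nat) : Int) - 1 = (4 : Int) ^ w.toNat := by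
      push_cast; ring
    rw [hcast]; exact h
  have hfold1 : (PySem.List.pyRange 0 (wca.length : Int) 1).foldl
      (fun sb i =>
        let pos := PySem.List.pyGetD ssw i 0 - w
        if 0 ≤ pos then pvBucketApp sb (PySem.List.pyGetD wca pos 0) pos else sb)
      (List.replicate (4 ^ w.toNat + 1) ([] : List Int))
      = ((ssw.filter (fun p => decide (0 ≤ p - w))).map (· - w)).foldl
          (fun sb pos => pvBucketApp sb (pvCode wca pos) pos)
          (List.replicate (4 ^ w.toNat + 1) ([] : List Int)) := by
    have hlen' : (wca.length : Int) = (ssw.length : Int) := by rw [hlen]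
    rw [hlen']
    exact (PySem.List.foldl_pyRange_pyGetD' ssw 0
      (fun sb v => if 0 ≤ v - w then pvBucketApp sb (PySem.List.pyGetD wca (v - w) 0) (v - w) else sb)
      _ (le_refl 0)).trans
      (pv_foldl_guard w (fun sb pos => pvBucketApp sb (pvCode wca pos) pos) ssw
        (List.replicate (4 ^ w.toNat + 1) []))
  simp only [pvPassA]
  rw [show (fun (sb : List (List Int)) (pos : Int) =>
      pvBucketApp sb (PySem.List.pyGetD wca pos 0) pos)
      = (fun sb pos => pvBucketApp sb (pvCode wca pos) pos) from rfl]
  rw [hfold1, ← List.foldl_append]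
  rw [show ((ssw.filter (fun p => decide (0 ≤ p - w))).map (· - w))
      ++ PySem.List.pyRange ((wca.length : Int) - w) (wca.length : Int) 1
      = pvS wca w ssw from rfl]
  obtain ⟨hL, hB⟩ := pv_bucket_fold wca (4 ^ w.toNat + 1) hnb (pvS wca w ssw)
    (List.replicate (4 ^ w.toNat + 1) []) (by simp) hv
  have hrep : ∀ b : Nat, (List.replicate (4 ^ w.toNat + 1) ([] : List Int)).getD b [] = [] := by
    intro b
    rw [List.getD_eq_getElem?_getD, List.getElem?_replicate]
    split <;> simp
  rw [pv_getLastD_eq, pv_dropLast_eq_map_range, hL]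
  have hlast : ((pvS wca w ssw).foldl (fun sb pos => pvBucketApp sb (pvCode wca pos) pos)
      (List.replicate (4 ^ w.toNat + 1) [])).getD (4 ^ w.toNat + 1 - 1) []
      = (pvS wca w ssw).filter (fun pos => pvCode wca pos == -1) := by
    rw [hB _ (by omega), hrep, List.nil_append]
    refine List.filter_congr fun x hx => ?_
    have h := hv x hx
    have hiff := pv_bidx_last (4 ^ w.toNat + 1) hnb _ h.1 h.2
    by_cases h1 : pvCode wca x = -1
    · rw [beq_iff_eq.mpr (hiff.mpr h1), beq_iff_eq.mpr h1]
    · have e1 : (pvBidx (4 ^ w.toNat + 1) (pvCode wca x) == 4 ^ w.toNat + 1 - 1) = false := by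
        rw [beq_eq_false_iff_ne]
        exact fun hh => h1 (hiff.mp hh)
      have e2 : (pvCode wca x == -1) = false := by
        rw [beq_eq_false_iff_ne]
        exact h1
      rw [e1, e2]
  have hblocks : (List.range (4 ^ w.toNat + 1 - 1)).map
      (fun b => ((pvS wca w ssw).foldl (fun sb pos => pvBucketApp sb (pvCode wca pos) pos)
        (List.replicate (4 ^ w.toNat + 1) [])).getD b [])
      = (List.range (4 ^ w.toNat)).map
          (fun b : Nat => (pvS wca w ssw).filter (fun pos => pvCode wca pos == (b : Int))) := by
    rw [show (4 ^ w.toNat + 1 - 1) = 4 ^ w.toNat from rfl]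
    refine List.map_congr_left fun b hb => ?_
    have hbm : b < 4 ^ w.toNat := List.mem_range.mp hb
    rw [hB b (by omega), hrep, List.nil_append]
    refine List.filter_congr fun x hx => ?_
    have h := hv x hx
    have hiff := pv_bidx_small (4 ^ w.toNat + 1) _ h.1 b (by omega)
    by_cases h1 : pvCode wca x = (b : Int)
    · rw [beq_iff_eq.mpr (hiff.mpr h1), beq_iff_eq.mpr h1]
    · have e1 : (pvBidx (4 ^ w.toNat + 1) (pvCode wca x) == b) = false := by
        rw [beq_eq_false_iff_ne]
        exact fun hh => h1 (hiff.mp hh)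
      have e2 : (pvCode wca x == (b : Int)) = false := by
        rw [beq_eq_false_iff_ne]
        exact h1
      rw [e1, e2]
  rw [hlast, hblocks]
  rfl

-- pvEmit is a permutation of its stream --------------------------------------
theorem pv_emit_blocks_perm (code : Int → Int) :
    ∀ (m : Nat) (S : List Int), (∀ x ∈ S, 0 ≤ code x ∧ code x < (m : Int)) →
      (((List.range m).map
        (fun b : Nat => S.filter (fun pos => code pos == (b : Int)))).flatten).Perm S := by
  intro m
  induction m with
  | zero =>
    intro S hS
    have hnil : S = [] := by
      rw [List.eq_nil_iff_forall_not_mem]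
      intro a ha
      have := hS a ha
      push_cast at this
      omega
    simp [hnil]
  | succ m ih =>
    intro S hS
    rw [List.range_succ, List.map_append, List.flatten_append]
    simp only [List.map_cons, List.map_nil, List.flatten_cons, List.flatten_nil,
      List.append_nil]
    have hblocks : ∀ b ∈ List.range m,
        S.filter (fun pos => code pos == (b : Int))
          = (S.filter (fun x => decide (code x < (m : Int)))).filter
              (fun pos => code pos == (b : Int)) := by
      intro b hb
      have hbm : b < m := List.mem_range.mp hb
      rw [List.filter_filter]
      refine List.filter_congr fun x _ => ?_
      by_cases h : code x = (b : Int)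
      · simp [h, hbm]
      · simp [h]
    rw [List.map_congr_left hblocks]
    have h2 := ih (S.filter (fun x => decide (code x < (m : Int)))) (by
      intro x hx
      rw [List.mem_filter] at hx
      refine ⟨(hS x hx.1).1, by simpa using hx.2⟩)
    have h3 : S.filter (fun pos => code pos == ((m : Nat) : Int))
        = S.filter (fun x => !decide (code x < (m : Int))) := by
      refine List.filter_congr fun x hx => ?_
      have hb := hS x hx
      by_cases h : code x = ((m : Nat) : Int)
      · simp [h]
      · have hlt : code x < (m : Int) := by
          push_cast at hb ⊢
          omega
        simp [h, hlt]
    exact (h2.append_right _).trans (by rw [h3]; exact List.filter_append_perm _ S)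

theorem pv_emit_perm (wca : List Int) (m : Nat) (S : List Int)
    (hv : ∀ x ∈ S, -1 ≤ pvCode wca x ∧ pvCode wca x < (m : Int)) :
    (pvEmit wca m S).Perm S := by
  unfold pvEmit
  have hSp : ∀ x ∈ S.filter (fun x => !(pvCode wca x == -1)),
      0 ≤ pvCode wca x ∧ pvCode wca x < (m : Int) := by
    intro x hx
    rw [List.mem_filter] at hx
    have h := hv x hx.1
    have hne : pvCode wca x ≠ -1 := by simpa using hx.2
    exact ⟨by omega, h.2⟩
  have hblocks : (List.range m).map
      (fun b : Nat => S.filter (fun pos => pvCode wca pos == (b : Int)))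
      = (List.range m).map (fun b : Nat =>
          (S.filter (fun x => !(pvCode wca x == -1))).filter
            (fun pos => pvCode wca pos == (b : Int))) := by
    refine List.map_congr_left fun b _ => ?_
    rw [List.filter_filter]
    refine List.filter_congr fun x _ => ?_
    by_cases h : pvCode wca x = (b : Int)
    · have : pvCode wca x ≠ -1 := by omega
      simp [h, this]
    · simp [h]
  rw [hblocks]
  have h1 := pv_emit_blocks_perm (pvCode wca) m
    (S.filter (fun x => !(pvCode wca x == -1))) hSp
  exact (List.Perm.append_left _ h1).trans (List.filter_append_perm _ S)

-- pvEmit is pairwise-sorted for the extended key ------------------------------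
theorem pv_emit_pairwise (wca : List Int) (w : Int) (t : Nat) (S : List Int)
    (hmem : ∀ x ∈ S, 0 ≤ x ∧ x < (wca.length : Int))
    (hpw : S.Pairwise (fun p q => pvLtK wca w t (p + w) (q + w))) :
    (pvEmit wca (4 ^ w.toNat) S).Pairwise (pvLtK wca w (t + 1)) := by
  unfold pvEmit
  rw [List.pairwise_append]
  refine ⟨?_, ?_, ?_⟩
  · refine (hpw.filter _).imp_of_mem ?_
    intro a b ha hb hR
    rw [List.mem_filter] at ha hb
    have hae : pvCode wca a = -1 := by simpa using ha.2
    have hbe : pvCode wca b = -1 := by simpa using hb.2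
    exact pv_ltk_succ_of_code_eq wca w t a b (hmem a ha.1).2 (hmem b hb.1).2
      (by rw [hae, hbe]) hR
  · rw [List.pairwise_flatten]
    constructor
    · intro l hl
      obtain ⟨b, _, rfl⟩ := List.mem_map.mp hl
      refine (hpw.filter _).imp_of_mem ?_
      intro x y hx hy hR
      rw [List.mem_filter] at hx hy
      have hxe : pvCode wca x = (b : Int) := by simpa using hx.2
      have hye : pvCode wca y = (b : Int) := by simpa using hy.2
      exact pv_ltk_succ_of_code_eq wca w t x y (hmem x hx.1).2 (hmem y hy.1).2
        (by rw [hxe, hye]) hR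
    · refine List.Pairwise.map _ ?_ List.pairwise_lt_range
      intro b b' hbb x hx y hy
      rw [List.mem_filter] at hx hy
      have hxe : pvCode wca x = (b : Int) := by simpa using hx.2
      have hye : pvCode wca y = (b' : Int) := by simpa using hy.2
      refine pv_ltk_of_code_lt wca w t x y (hmem x hx.1).2 (hmem y hy.1).2 ?_
      rw [hxe, hye]
      exact_mod_cast hbb
  · intro x hx y hy
    rw [List.mem_filter] at hx
    have hxe : pvCode wca x = -1 := by simpa using hx.2
    obtain ⟨l, hl, hyl⟩ := List.mem_flatten.mp hy
    obtain ⟨b, _, rfl⟩ := List.mem_map.mp hl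
    rw [List.mem_filter] at hyl
    have hye : pvCode wca y = (b : Int) := by simpa using hyl.2
    refine pv_ltk_of_code_lt wca w t x y (hmem x hx.1).2 (hmem y hyl.1).2 ?_
    rw [hxe, hye]
    have : (0 : Int) ≤ (b : Int) := by positivity
    omega

-- the stream pvS: membership, permutation, pairwise ---------------------------
theorem pv_S_mem (wca : List Int) (w : Int) (ssw : List Int)
    (hw : 0 ≤ w) (hwn : w ≤ (wca.length : Int))
    (hperm : ssw.Perm (PySem.List.pyRange 0 (wca.length : Int) 1)) :
    ∀ x ∈ pvS wca w ssw, 0 ≤ x ∧ x < (wca.length : Int) := by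
  intro x hx
  rcases List.mem_append.mp hx with hx | hx
  · obtain ⟨p, hp, rfl⟩ := List.mem_map.mp hx
    rw [List.mem_filter] at hp
    have hmem : p ∈ PySem.List.pyRange 0 (wca.length : Int) 1 := hperm.mem_iff.mp hp.1
    have h1 := PySem.List.mem_pyRange_one.mp hmem
    have h2 : 0 ≤ p - w := by simpa using hp.2
    omega
  · have := PySem.List.mem_pyRange_one.mp hx
    omega

theorem pv_map_sub_pyRange (w n : Int) :
    (PySem.List.pyRange w n 1).map (· - w) = PySem.List.pyRange 0 (n - w) 1 := by
  rw [PySem.List.pyRange_one w n, PySem.List.pyRange_one 0 (n - w), List.map_map, sub_zero]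
  exact List.map_congr_left fun k _ => by simp [Function.comp]

theorem pv_S_perm (wca : List Int) (w : Int) (ssw : List Int)
    (hw : 0 ≤ w) (hwn : w ≤ (wca.length : Int))
    (hperm : ssw.Perm (PySem.List.pyRange 0 (wca.length : Int) 1)) :
    (pvS wca w ssw).Perm (PySem.List.pyRange 0 (wca.length : Int) 1) := by
  unfold pvS
  have h2 : (PySem.List.pyRange 0 (wca.length : Int) 1).filter (fun p => decide (0 ≤ p - w))
      = PySem.List.pyRange w (wca.length : Int) 1 := by
    rw [PySem.List.pyRange_one_append 0 w (wca.length : Int) hw hwn, List.filter_append]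
    have hnil : (PySem.List.pyRange 0 w 1).filter (fun p => decide (0 ≤ p - w)) = [] := by
      rw [List.filter_eq_nil_iff]
      intro a ha
      have := PySem.List.mem_pyRange_one.mp ha
      simp
      omega
    have hself : (PySem.List.pyRange w (wca.length : Int) 1).filter
        (fun p => decide (0 ≤ p - w)) = PySem.List.pyRange w (wca.length : Int) 1 := by
      rw [List.filter_eq_self]
      intro a ha
      have := PySem.List.mem_pyRange_one.mp ha
      simp
      omega
    rw [hnil, hself, List.nil_append]
  have h3 : ((ssw.filter (fun p => decide (0 ≤ p - w))).map (· - w)).Perm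
      (PySem.List.pyRange 0 ((wca.length : Int) - w) 1) := by
    rw [← pv_map_sub_pyRange w (wca.length : Int)]
    exact (h2 ▸ (hperm.filter _)).map _
  refine (List.Perm.append h3 (List.Perm.refl _)).trans ?_
  rw [← PySem.List.pyRange_one_append 0 ((wca.length : Int) - w) (wca.length : Int)
    (by omega) (by omega)]

theorem pv_S_pairwise (wca : List Int) (w : Int) (t : Nat) (ssw : List Int)
    (hw : 0 ≤ w) (hwn : w ≤ (wca.length : Int))
    (hc : ∀ c ∈ wca, -1 ≤ c ∧ c < (4 : Int) ^ w.toNat)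
    (hperm : ssw.Perm (PySem.List.pyRange 0 (wca.length : Int) 1))
    (hpw : ssw.Pairwise (pvLtK wca w t)) :
    (pvS wca w ssw).Pairwise (fun p q => pvLtK wca w t (p + w) (q + w)) := by
  unfold pvS
  rw [List.pairwise_append]
  refine ⟨?_, ?_, ?_⟩
  · refine List.Pairwise.map _ ?_ (hpw.filter _)
    intro a b hR
    have ha : a - w + w = a := by ring
    have hb : b - w + w = b := by ring
    rw [ha, hb]
    exact hR
  · refine (PySem.List.pairwise_lt_pyRange_one _ _).imp_of_mem ?_
    intro a b ha hb hR
    have ha' := PySem.List.mem_pyRange_one.mp ha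
    have hb' := PySem.List.mem_pyRange_one.mp hb
    right
    exact ⟨pvEnt_eq_of_ge wca w hw t (a + w) (b + w) (by omega) (by omega), by omega⟩
  · intro a ha b hb
    obtain ⟨p, hp, rfl⟩ := List.mem_map.mp ha
    rw [List.mem_filter] at hp
    have hpmem : p ∈ PySem.List.pyRange 0 (wca.length : Int) 1 := hperm.mem_iff.mp hp.1
    have hpb := PySem.List.mem_pyRange_one.mp hpmem
    have hp0 : 0 ≤ p - w := by simpa using hp.2
    have hbmem := PySem.List.mem_pyRange_one.mp hb
    exact pv_ltk_of_lt_of_ge wca w hw hc t (p - w + w) (b + w) (by omega) (by omega) (by omega)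

-- one full pass --------------------------------------------------------------
theorem pv_pass_spec (wca : List Int) (w : Int) (t : Nat) (ssw : List Int)
    (hw : 0 ≤ w) (hwn : w ≤ (wca.length : Int))
    (hc : ∀ c ∈ wca, -1 ≤ c ∧ c < (4 : Int) ^ w.toNat)
    (hperm : ssw.Perm (PySem.List.pyRange 0 (wca.length : Int) 1))
    (hpw : ssw.Pairwise (pvLtK wca w t)) :
    (pvPassA wca w ssw).Perm (PySem.List.pyRange 0 (wca.length : Int) 1) ∧
      (pvPassA wca w ssw).Pairwise (pvLtK wca w (t + 1)) := by
  have hmem := pv_S_mem wca w ssw hw hwn hperm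
  have hlen : ssw.length = wca.length := by
    have h := hperm.length_eq
    rwa [PySem.List.length_pyRange_one,
      show ((wca.length : Int) - 0).toNat = wca.length by omega] at h
  have hSperm := pv_S_perm wca w ssw hw hwn hperm
  have hSpw := pv_S_pairwise wca w t ssw hw hwn hc hperm hpw
  rw [pv_pass_eq_emit wca w ssw hlen hc hmem]
  have hv : ∀ x ∈ pvS wca w ssw,
      -1 ≤ pvCode wca x ∧ pvCode wca x < ((4 ^ w.toNat : Nat) : Int) := by
    intro x hx
    have h := pv_code_mem wca w hc x (hmem x hx).1 (hmem x hx).2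
    refine ⟨h.1, ?_⟩
    have : ((4 ^ w.toNat : Nat) : Int) = (4 : Int) ^ w.toNat := by push_cast; ring
    rw [this]
    exact h.2
  exact ⟨(pv_emit_perm wca (4 ^ w.toNat) (pvS wca w ssw) hv).trans hSperm,
    pv_emit_pairwise wca w t (pvS wca w ssw) hmem hSpw⟩

-- the outer loop invariant ----------------------------------------------------
theorem pv_inv (wca : List Int) (w : Int)
    (hw : 0 ≤ w) (hwn : w ≤ (wca.length : Int))
    (hc : ∀ c ∈ wca, -1 ≤ c ∧ c < (4 : Int) ^ w.toNat) :
    ∀ t : Nat,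
      (((PySem.List.pyRange 0 (t : Int) 1).foldl (fun ssw _ => pvPassA wca w ssw)
          (PySem.List.pyRange 0 (wca.length : Int) 1)).Perm
        (PySem.List.pyRange 0 (wca.length : Int) 1)) ∧
      ((PySem.List.pyRange 0 (t : Int) 1).foldl (fun ssw _ => pvPassA wca w ssw)
          (PySem.List.pyRange 0 (wca.length : Int) 1)).Pairwise (pvLtK wca w t) := by
  intro t
  induction t with
  | zero =>
    rw [show ((0 : Nat) : Int) = 0 by rfl, PySem.List.pyRange_one_eq_nil (le_refl 0)]
    refine ⟨List.Perm.refl _, ?_⟩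
    simp only [List.foldl_nil]
    exact (PySem.List.pairwise_lt_pyRange_one 0 _).imp fun h => Or.inr ⟨rfl, h⟩
  | succ t ih =>
    rw [show ((t + 1 : Nat) : Int) = (t : Int) + 1 by push_cast; ring,
      PySem.List.pyRange_one_succ_right (by positivity), List.foldl_append]
    exact pv_pass_spec wca w t _ hw hwn hc ih.1 ih.2

-- B's key is the full key ------------------------------------------------------
theorem pv_keyB_eq (wca : List Int) (w cut : Int) :
    pvKeyB wca w cut = fun p => pvKt wca w cut.toNat p := by
  funext p
  simp only [pvKeyB, pvKt, pvEnt, PySem.List.pyRange_one, List.map_map]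
  congr 1
  rw [show (cut - 0).toNat = cut.toNat by omega]
  exact List.map_congr_left fun k _ => by simp [pvE]

-- bridging PySem.sorted's LT instance to the LinearOrder one -------------------
theorem pv_sorted_eq (xs ys : List Int) (key : Int → List Int) (h1 : ys.Perm xs)
    (h2 : ys.Pairwise (fun a b => key a < key b)) : PySem.List.sorted xs key false = ys := by
  have h := PySem.List.sorted_eq_of_perm_of_pairwise_lt xs ys key h1 h2
  convert h using 2 <;> exact Subsingleton.elim _ _

-- ===== VERDICT (by name: the statement is the Claim_ definition above) =====
theorem create_superword_array_spec : Claim_equal_create_superword_array := by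
  intro wca w cut _ hpre
  obtain ⟨hw, hrest⟩ := hpre
  unfold Spec_create_superword_array create_superword_array create_superword_array_alt
  rcases hrest with hcut | ⟨hwn, hc0⟩
  · -- wlcut ≤ 0: no pass runs, both sides are [1, …, n]
    rw [PySem.List.pyRange_one_eq_nil hcut]
    simp only [List.foldl_nil]
    have hkey : (PySem.List.pyRange 0 (wca.length : Int) 1).Pairwise
        (fun a b => pvKeyB wca w cut a < pvKeyB wca w cut b) := by
      rw [pv_keyB_eq wca w cut, Int.toNat_of_nonpos hcut]
      refine (PySem.List.pairwise_lt_pyRange_one 0 _).imp ?_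
      intro a b h
      exact pv_kt_lt wca w 0 a b (Or.inr ⟨rfl, h⟩)
    rw [pv_sorted_eq _ _ _ (List.Perm.refl _) hkey]
  have hc : ∀ c ∈ wca, -1 ≤ c ∧ c < (4 : Int) ^ w.toNat := by
    simpa [Nat.min_eq_left (show w.toNat ≤ wca.length by omega)] using hc0
  have houter : PySem.List.pyRange 0 cut 1 = PySem.List.pyRange 0 (cut.toNat : Int) 1 := by
    by_cases h : 0 ≤ cut
    · rw [Int.toNat_of_nonneg h]
    · have h0 : cut.toNat = 0 := Int.toNat_of_nonpos (by omega)
      rw [PySem.List.pyRange_one_eq_nil (by omega), h0,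
        show ((0 : Nat) : Int) = 0 by rfl, PySem.List.pyRange_one_eq_nil (le_refl 0)]
  rw [houter]
  obtain ⟨hperm, hpw⟩ := pv_inv wca w hw hwn hc cut.toNat
  have hkey : ((PySem.List.pyRange 0 (cut.toNat : Int) 1).foldl
      (fun ssw _ => pvPassA wca w ssw)
      (PySem.List.pyRange 0 (wca.length : Int) 1)).Pairwise
      (fun a b => pvKeyB wca w cut a < pvKeyB wca w cut b) := by
    rw [pv_keyB_eq wca w cut]
    exact hpw.imp fun h => pv_kt_lt wca w cut.toNat _ _ h
  rw [pv_sorted_eq _ _ _ hperm hkey]
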